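-- pv_equiv track=rewrite | github.com/magicianmakar/django-project | shopified_core/shipping_helper.py | normalize_country_code
-- ===== SOURCE A (Python) =====
-- def normalize_country_code(country):
--     country_code = None
--     country = country.lower().strip() if country else ''
--
--     countries_map = {
--         'uk': ['gb', 'united kingdom'],
--         'es': ['spain'],
--         'au': ['australia'],
--         'nl': ['netherlands'],
--         'cl': ['chile'],
--         'ua': ['ukraine'],
--         'nz': ['new zealand'],
--         'us': ['united states'],
--         'ca': ['canada'],
--         'ru': ['russia'],
--         'id': ['indonesia'],
--         'th': ['thailand'],
--         'pl': ['poland'],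
--         'fr': ['france'],
--         'it': ['italy'],
--         'tr': ['turkey'],
--         'br': ['brazil'],
--         'kr': ['korea', 'south korea'],
--         'sa': ['saudi arabia'],
--     }
--
--     for code, names in countries_map.items():
--         if country == code or country in names:
--             country_code = code
--             break
--
--     return country_code
-- ===== SOURCE B (Python) =====
-- # Explicit inverse lookup table: each code maps to itself, each alias to its code.
-- _LOOKUP = {
--     'uk': 'uk', 'gb': 'uk', 'united kingdom': 'uk',
--     'es': 'es', 'spain': 'es',
--     'au': 'au', 'australia': 'au',
--     'nl': 'nl', 'netherlands': 'nl',
--     'cl': 'cl', 'chile': 'cl',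
--     'ua': 'ua', 'ukraine': 'ua',
--     'nz': 'nz', 'new zealand': 'nz',
--     'us': 'us', 'united states': 'us',
--     'ca': 'ca', 'canada': 'ca',
--     'ru': 'ru', 'russia': 'ru',
--     'id': 'id', 'indonesia': 'id',
--     'th': 'th', 'thailand': 'th',
--     'pl': 'pl', 'poland': 'pl',
--     'fr': 'fr', 'france': 'fr',
--     'it': 'it', 'italy': 'it',
--     'tr': 'tr', 'turkey': 'tr',
--     'br': 'br', 'brazil': 'br',
--     'kr': 'kr', 'korea': 'kr', 'south korea': 'kr',
--     'sa': 'sa', 'saudi arabia': 'sa',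
-- }
--
--
-- def normalize_country_code(country):
--     return _LOOKUP.get(country.lower().strip() if country else '')
-- ===== Notes on version B (the rewrite author's own statement) =====
-- stated objective: idiomatic
-- what changed: B replaces A's per-call for-loop/break scan over a code->names map by a single .get on an explicit inverse dict literal mapping every code and alias name directly to its code.
import Mathlib
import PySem

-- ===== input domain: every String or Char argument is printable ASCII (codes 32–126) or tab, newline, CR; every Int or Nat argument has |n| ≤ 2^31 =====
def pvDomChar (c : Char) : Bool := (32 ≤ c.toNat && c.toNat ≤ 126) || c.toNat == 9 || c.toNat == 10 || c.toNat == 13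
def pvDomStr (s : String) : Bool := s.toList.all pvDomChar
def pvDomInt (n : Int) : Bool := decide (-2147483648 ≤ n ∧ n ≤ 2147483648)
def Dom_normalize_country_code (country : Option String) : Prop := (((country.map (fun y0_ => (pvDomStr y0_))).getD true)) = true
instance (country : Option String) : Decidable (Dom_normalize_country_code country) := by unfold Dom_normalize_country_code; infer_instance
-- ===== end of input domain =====

-- B replaces A's per-call for/break scan over the code->names map by one .get on an explicit inverse dict literal (idiomatic).

-- ===== PORT A =====
-- the countries_map literal, in insertion order
def ncMap : List (String × List String) :=
  [("uk", ["gb", "united kingdom"]),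
   ("es", ["spain"]),
   ("au", ["australia"]),
   ("nl", ["netherlands"]),
   ("cl", ["chile"]),
   ("ua", ["ukraine"]),
   ("nz", ["new zealand"]),
   ("us", ["united states"]),
   ("ca", ["canada"]),
   ("ru", ["russia"]),
   ("id", ["indonesia"]),
   ("th", ["thailand"]),
   ("pl", ["poland"]),
   ("fr", ["france"]),
   ("it", ["italy"]),
   ("tr", ["turkey"]),
   ("br", ["brazil"]),
   ("kr", ["korea", "south korea"]),
   ("sa", ["saudi arabia"])]

-- the for/break loop over countries_map.items()
def ncLoop (country : String) : List (String × List String) → Option String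
  | [] => none
  | (code, names) :: rest =>
    if country == code || names.contains country then some code
    else ncLoop country rest

def normalize_country_code (country : Option String) : Option String :=
  -- country = country.lower().strip() if country else ''
  let c : String :=
    match country with
    | none => ""
    | some s => if s == "" then "" else PySem.Str.strip (PySem.Str.lower s)
  ncLoop c ncMap

-- ===== PORT B =====
-- _LOOKUP: the explicit inverse dict literal of Source B (all keys distinct)
def ncLookup : PySem.Dict String String :=
  PySem.Dict.ofList
    [("uk", "uk"), ("gb", "uk"), ("united kingdom", "uk"),
     ("es", "es"), ("spain", "es"),
     ("au", "au"), ("australia", "au"),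
     ("nl", "nl"), ("netherlands", "nl"),
     ("cl", "cl"), ("chile", "cl"),
     ("ua", "ua"), ("ukraine", "ua"),
     ("nz", "nz"), ("new zealand", "nz"),
     ("us", "us"), ("united states", "us"),
     ("ca", "ca"), ("canada", "ca"),
     ("ru", "ru"), ("russia", "ru"),
     ("id", "id"), ("indonesia", "id"),
     ("th", "th"), ("thailand", "th"),
     ("pl", "pl"), ("poland", "pl"),
     ("fr", "fr"), ("france", "fr"),
     ("it", "it"), ("italy", "it"),
     ("tr", "tr"), ("turkey", "tr"),
     ("br", "br"), ("brazil", "br"),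
     ("kr", "kr"), ("korea", "kr"), ("south korea", "kr"),
     ("sa", "sa"), ("saudi arabia", "sa")]

def normalize_country_code_alt (country : Option String) : Option String :=
  ncLookup.get?
    (match country with
     | none => ""
     | some s => if s == "" then "" else PySem.Str.strip (PySem.Str.lower s))

-- ===== PRECONDITION & SPEC =====
def Spec_normalize_country_code (country : Option String) (out : Option String) : Prop := out = normalize_country_code_alt country
instance (country : Option String) (out : Option String) : Decidable (Spec_normalize_country_code country out) := by unfold Spec_normalize_country_code; infer_instance

-- ===== CLAIM =====
def Claim_equal_normalize_country_code : Prop := ∀ (country : Option String), Dom_normalize_country_code country → Spec_normalize_country_code country (normalize_country_code country)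

-- ===== LEMMAS AND PROOFS =====

-- the flattened inverse table, as an association list
def ncFlat (entries : List (String × List String)) : List (String × String) :=
  entries.flatMap (fun p => (p.1 :: p.2).map (fun n => (n, p.1)))

-- the literal inverse dict equals A's map flattened (keys are distinct, so ofList is the plain list)
set_option maxRecDepth 4000 in
lemma ncLookup_eq : ncLookup = PySem.Dict.mk (ncFlat ncMap) := by decide

-- first-match lookup in one entry's block of (name, code) pairs = Python's 'in names' test
lemma get?_block (code c : String) (names : List String) (tail : List (String × String)) :
    (PySem.Dict.mk (names.map (fun n => (n, code)) ++ tail)).get? c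
      = if names.contains c then some code else (PySem.Dict.mk tail).get? c := by
  induction names with
  | nil => simp
  | cons n ns ih =>
    simp only [List.map_cons, List.cons_append, PySem.Dict.get?_mk_cons, List.contains_cons, ih]
    by_cases h : n = c
    · simp [h]
    · have : (c == n) = false := by simp [beq_eq_false_iff_ne]; exact fun hc => h hc.symm
      simp [h, this]

-- first-match lookup in the flattened table = A's for/break loop
lemma get?_flat (entries : List (String × List String)) (c : String) :
    (PySem.Dict.mk (ncFlat entries)).get? c = ncLoop c entries := by
  induction entries with
  | nil => simp [ncFlat, ncLoop, PySem.Dict.get?]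
  | cons p rest ih =>
    obtain ⟨code, names⟩ := p
    simp only [ncFlat, List.flatMap_cons, List.map_cons, List.cons_append,
      PySem.Dict.get?_mk_cons, ncLoop]
    rw [get?_block]
    by_cases h : code = c
    · simp [h]
    · have hb : (c == code) = false := by simp [beq_eq_false_iff_ne]; exact fun hc => h hc.symm
      have hb' : (code == c) = false := by simp [beq_eq_false_iff_ne]; exact h
      by_cases hn : c ∈ names
      · simp [hb, hb', hn]
      · simp only [ncFlat, List.map_cons] at ih
        simp [hb, hb', hn, ih]

-- ===== VERDICT =====
theorem normalize_country_code_spec : Claim_equal_normalize_country_code := by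
  intro country _
  unfold Spec_normalize_country_code normalize_country_code normalize_country_code_alt
  rw [ncLookup_eq, get?_flat]
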